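-- pv_equiv track=rewrite | github.com/jesopo/scpl | scpl/common/util.py | with_delimiter
-- ===== SOURCE A (Python) =====
-- from typing import Iterator, Optional, Sequence
--
-- def find_unescaped(
--         s: str,
--         c: str
--         ) -> Iterator[int]:
--
--     i = 0
--
--     while i < len(s):
--         c2 = s[i]
--         if c2 == "\\":
--             i += 1
--         elif c2 == c:
--             yield i
--         i += 1
--
-- def find_unused_delimiter(
--         s:     str,
--         chars: Sequence[str]
--         ) -> Optional[str]:
--
--     for char in chars:
--         try:
--             next(find_unescaped(s, char))
--         except StopIteration:
--             return char
--     else: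
--         return None
--
-- def with_delimiter(
--         s:     str,
--         chars: Sequence[str]
--         ) -> str:
--
--     if unused_delim := find_unused_delimiter(s, chars):
--         delim = unused_delim
--     else:
--         delim  = chars[0]
--         found  = find_unescaped(s, delim)
--         rdelim = f"\\{delim}"
--         for index in reversed(list(found)):
--             s = s[:index] + rdelim + s[index+1:]
--
--     return f"{delim}{s}{delim}"
-- ===== SOURCE B (Python) =====
-- def with_delimiter(s, chars):
--     # Single pass: collect the set of characters that occur unescaped in s,
--     # pick the first delimiter candidate not in it; if none (or only the
--     # falsy ""), escape occurrences of chars[0] in one forward scan.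
--     escaped = False
--     unescaped = set()
--     for ch in s:
--         if escaped:
--             escaped = False
--         elif ch == "\\":
--             escaped = True
--         else:
--             unescaped.add(ch)
--     delim = next((c for c in chars if c not in unescaped), None)
--     if not delim:
--         delim = chars[0]
--         out = []
--         escaped = False
--         for ch in s:
--             if escaped:
--                 escaped = False
--                 out.append(ch)
--             elif ch == "\\":
--                 escaped = True
--                 out.append(ch)
--             elif ch == delim:
--                 out.append("\\" + ch)
--             else:
--                 out.append(ch)
--         s = "".join(out)
--     return delim + s + delim
-- ===== Notes on version B (the rewrite author's own statement) =====
-- stated objective: faster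
-- what changed: B replaces A's per-candidate generator rescans and quadratic repeated string slicing (s = s[:i] + '\'+d + s[i+1:] per occurrence) by two single forward passes with an escape flag: one pass collecting the set of unescaped characters, one pass building the escaped string.
import Mathlib
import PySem

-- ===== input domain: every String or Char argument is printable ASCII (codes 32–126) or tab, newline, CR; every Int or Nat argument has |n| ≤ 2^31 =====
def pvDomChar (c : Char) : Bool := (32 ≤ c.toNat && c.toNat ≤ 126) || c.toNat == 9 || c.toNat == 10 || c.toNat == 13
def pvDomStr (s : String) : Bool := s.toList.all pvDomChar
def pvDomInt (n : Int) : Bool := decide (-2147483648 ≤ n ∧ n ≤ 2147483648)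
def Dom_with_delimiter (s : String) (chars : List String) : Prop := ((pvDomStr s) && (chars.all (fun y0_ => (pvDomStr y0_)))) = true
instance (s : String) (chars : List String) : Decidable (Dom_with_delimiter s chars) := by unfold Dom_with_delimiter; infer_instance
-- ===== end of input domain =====

-- B replaces A's quadratic repeated-slicing escape loop and per-candidate rescans by two
-- single forward passes with an escape flag (objective: faster on the escaping branch).

-- ===== PORT A =====
-- find_unescaped(s, c): while-loop over indices; backslash skips the next character;
-- yields the indices i with s[i] == c.  Ported as the list of yielded indices.
def fuAux (l : List Char) (i : Int) (c : List Char) : List Int :=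
  match l with
  | [] => []
  | ch :: rest =>
    if ch = '\\' then
      -- i += 1 (skip next char) then i += 1
      match rest with
      | [] => []
      | _ :: rest2 => fuAux rest2 (i + 2) c
    else if [ch] = c then i :: fuAux rest (i + 1) c
    else fuAux rest (i + 1) c

-- find_unused_delimiter: first char whose find_unescaped yields nothing, else None
def findUnusedDelimiter (l : List Char) : List String → Option String
  | [] => none
  | c :: rest => if fuAux l 0 c.toList = [] then some c else findUnusedDelimiter l rest

-- the else-branch: for index in reversed(list(found)): s = s[:index] + "\\"+delim + s[index+1:]
def escapeA (l : List Char) (delim : String) : List Char :=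
  -- found = list(find_unescaped(s, delim)); rdelim = "\\" + delim (inlined)
  ((fuAux l 0 delim.toList).reverse).foldl
    (fun cur idx => PySem.List.slice cur none (some idx) ++ ('\\' :: delim.toList) ++
                    PySem.List.slice cur (some (idx + 1)) none) l

def with_delimiter (s : String) (chars : List String) : String :=
  match findUnusedDelimiter s.toList chars with
  | some u =>
    if u = "" then   -- walrus truthiness: "" is falsy, fall through to the else branch
      match chars with
      | [] => ""     -- chars[0]: IndexError in Python; excluded by Pre_
      | d0 :: _ => String.ofList (d0.toList ++ escapeA s.toList d0 ++ d0.toList)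
    else String.ofList (u.toList ++ s.toList ++ u.toList)
  | none =>
    match chars with
    | [] => ""       -- chars[0]: IndexError in Python; excluded by Pre_
    | d0 :: _ => String.ofList (d0.toList ++ escapeA s.toList d0 ++ d0.toList)

-- ===== PORT B =====
-- one pass: (escape flag, set of characters occurring unescaped in s)
def scanUnescaped (l : List Char) : Bool × PySem.Set String :=
  l.foldl
    (fun st ch =>
      if st.1 then (false, st.2)
      else if ch = '\\' then (true, st.2)
      else (false, PySem.Set.add st.2 (String.ofList [ch])))
    (false, PySem.Set.empty)

-- one forward pass building the escaped string
def escapeB (l : List Char) (delim : String) : List Char :=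
  (l.foldl
    (fun (st : Bool × List Char) ch =>
      if st.1 then (false, st.2 ++ [ch])
      else if ch = '\\' then (true, st.2 ++ [ch])
      else if String.ofList [ch] = delim then (false, st.2 ++ ['\\', ch])
      else (false, st.2 ++ [ch]))
    (false, [])).2

def with_delimiter_alt (s : String) (chars : List String) : String :=
  match chars.find? (fun c => !(PySem.Set.contains (scanUnescaped s.toList).2 c)) with
  | some d =>
    if d = "" then   -- "if not delim"
      match chars with
      | [] => ""
      | d0 :: _ => String.ofList (d0.toList ++ escapeB s.toList d0 ++ d0.toList)
    else String.ofList (d.toList ++ s.toList ++ d.toList)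
  | none =>
    match chars with
    | [] => ""
    | d0 :: _ => String.ofList (d0.toList ++ escapeB s.toList d0 ++ d0.toList)

-- ===== PRECONDITION & SPEC =====
-- Python A raises IndexError (chars[0]) exactly when chars is empty and no unused
-- delimiter is found — i.e. whenever chars == []; Pre_ excludes only that.
def Pre_with_delimiter (s : String) (chars : List String) : Prop := chars ≠ []
instance (s : String) (chars : List String) : Decidable (Pre_with_delimiter s chars) := by unfold Pre_with_delimiter; infer_instance

def pvWitness_with_delimiter : String × List String := ("a\\\"b\"c", ["\"", "'"])

def Spec_with_delimiter (s : String) (chars : List String) (out : String) : Prop := out = with_delimiter_alt s chars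
instance (s : String) (chars : List String) (out : String) : Decidable (Spec_with_delimiter s chars out) := by unfold Spec_with_delimiter; infer_instance

-- ===== CLAIM (what is proved, stated in full; the proofs are below) =====
def Claim_equal_with_delimiter : Prop := ∀ (s : String) (chars : List String), Dom_with_delimiter s chars → Pre_with_delimiter s chars → Spec_with_delimiter s chars (with_delimiter s chars)

-- ===== LEMMAS AND PROOFS =====

-- characters recorded as "occurring unescaped" by the scan, as pure recursion
def recChars (b : Bool) (l : List Char) : List String :=
  match b, l with
  | _, [] => []
  | true, _ :: t => recChars false t
  | false, ch :: t => if ch = '\\' then recChars true t else String.ofList [ch] :: recChars false t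

lemma scan_mem (l : List Char) : ∀ (b : Bool) (S : PySem.Set String) (x : String),
    x ∈ (l.foldl
      (fun st ch =>
        if st.1 then (false, st.2)
        else if ch = '\\' then (true, st.2)
        else (false, PySem.Set.add st.2 (String.ofList [ch])))
      (b, S)).2 ↔ x ∈ S ∨ x ∈ recChars b l := by
  induction l with
  | nil => intro b S x; simp [recChars]
  | cons ch t ih =>
    intro b S x
    cases b with
    | true => simp only [List.foldl_cons, if_true]; rw [ih]; simp [recChars]
    | false =>
      by_cases h : ch = '\\'
      · simp only [List.foldl_cons, h, if_neg (Bool.false_ne_true), if_true]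
        rw [ih]; simp [recChars]
      · simp only [List.foldl_cons, if_neg (Bool.false_ne_true), if_neg h]
        rw [ih]; simp only [recChars, if_neg h, PySem.Set.mem_add, List.mem_cons]
        tauto

lemma mem_scanUnescaped (l : List Char) (x : String) :
    x ∈ (scanUnescaped l).2 ↔ x ∈ recChars false l := by
  unfold scanUnescaped
  rw [scan_mem]
  simp [PySem.Set.empty]

lemma fuAux_empty_iff (l : List Char) (i : Int) (c : List Char) :
    fuAux l i c = [] ↔ ∀ x ∈ recChars false l, x.toList ≠ c := by
  fun_induction fuAux l i c with
  | case1 => simp [recChars]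
  | case2 => simp [recChars]
  | case3 _ c2 rest2 ih => simpa [recChars] using ih
  | case4 _ ch rest h hc ih =>
    simp only [recChars, if_neg h]
    constructor
    · intro habs; cases habs
    · intro hall
      exact absurd hc (by simpa using hall (String.ofList [ch]) (by simp))
  | case5 _ ch rest h hc ih =>
    simp only [recChars, if_neg h]
    rw [ih]
    constructor
    · intro hall x hx
      rcases List.mem_cons.mp hx with rfl | hx'
      · simpa using hc
      · exact hall x hx'
    · intro hall x hx; exact hall x (List.mem_cons_of_mem _ hx)

lemma fuAux_empty_iff_contains (sl : List Char) (c : String) :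
    (fuAux sl 0 c.toList = []) ↔ (PySem.Set.contains (scanUnescaped sl).2 c = false) := by
  rw [fuAux_empty_iff]
  rw [← Bool.not_eq_true, PySem.Set.contains_iff, mem_scanUnescaped]
  constructor
  · intro hall hmem; exact hall c hmem rfl
  · intro hnot x hx hxc
    exact hnot (String.toList_inj.mp hxc ▸ hx)

lemma find_eq (sl : List Char) (chars : List String) :
    findUnusedDelimiter sl chars =
      chars.find? (fun c => !(PySem.Set.contains (scanUnescaped sl).2 c)) := by
  induction chars with
  | nil => rfl
  | cons c rest ih =>
    unfold findUnusedDelimiter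
    by_cases h : fuAux sl 0 c.toList = []
    · rw [if_pos h]
      have hb : (!(PySem.Set.contains (scanUnescaped sl).2 c)) = true := by
        rw [(fuAux_empty_iff_contains sl c).mp h]; rfl
      rw [List.find?_cons_of_pos (p := fun x => !(PySem.Set.contains (scanUnescaped sl).2 x)) hb]
    · rw [if_neg h]
      have hb : (!(PySem.Set.contains (scanUnescaped sl).2 c)) = false := by
        by_contra hb
        exact h ((fuAux_empty_iff_contains sl c).mpr (by simpa using hb))
      rw [List.find?_cons_of_neg (p := fun x => !(PySem.Set.contains (scanUnescaped sl).2 x)) (by simpa using hb), ih]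

-- pure form of B's escaping pass
def ebOut (b : Bool) (l : List Char) (d : String) : List Char :=
  match b, l with
  | _, [] => []
  | true, ch :: t => ch :: ebOut false t d
  | false, ch :: t =>
    if ch = '\\' then ch :: ebOut true t d
    else if String.ofList [ch] = d then '\\' :: ch :: ebOut false t d
    else ch :: ebOut false t d

lemma escapeB_foldl (d : String) (l : List Char) : ∀ (b : Bool) (acc : List Char),
    (l.foldl
      (fun (st : Bool × List Char) ch =>
        if st.1 then (false, st.2 ++ [ch])
        else if ch = '\\' then (true, st.2 ++ [ch])
        else if String.ofList [ch] = d then (false, st.2 ++ ['\\', ch])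
        else (false, st.2 ++ [ch]))
      (b, acc)).2 = acc ++ ebOut b l d := by
  induction l with
  | nil => intro b acc; simp [ebOut]
  | cons ch t ih =>
    intro b acc
    cases b with
    | true => simp only [List.foldl_cons, if_true]; rw [ih]; simp [ebOut]
    | false =>
      by_cases h : ch = '\\'
      · simp only [List.foldl_cons, h, if_neg (Bool.false_ne_true), if_true]
        rw [ih]; simp [ebOut]
      · by_cases h2 : String.ofList [ch] = d
        · simp only [List.foldl_cons, if_neg (Bool.false_ne_true), if_neg h, if_pos h2]
          rw [ih]; simp [ebOut, h, h2]
        · simp only [List.foldl_cons, if_neg (Bool.false_ne_true), if_neg h, if_neg h2]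
          rw [ih]; simp [ebOut, h, h2]

lemma escapeB_eq (l : List Char) (d : String) : escapeB l d = ebOut false l d := by
  unfold escapeB
  rw [escapeB_foldl]
  simp

-- fuAux with the start index split off, indices as Nats
def fu0 : List Char → List Char → List Nat
  | [], _ => []
  | ch :: rest, c =>
    if ch = '\\' then
      match rest with
      | [] => []
      | _ :: rest2 => (fu0 rest2 c).map (· + 2)
    else if [ch] = c then 0 :: (fu0 rest c).map (· + 1)
    else (fu0 rest c).map (· + 1)

lemma fu0_cons (ch : Char) (rest c : List Char) (h : ¬ ch = '\\') :
    fu0 (ch :: rest) c =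
      if [ch] = c then 0 :: (fu0 rest c).map (· + 1) else (fu0 rest c).map (· + 1) := by
  conv_lhs => rw [fu0.eq_def]
  simp [h]

lemma fuAux_eq_fu0 (l : List Char) (i : Int) (c : List Char) :
    fuAux l i c = (fu0 l c).map (fun (k : Nat) => i + (k : Int)) := by
  fun_induction fuAux l i c with
  | case1 => simp [fu0]
  | case2 _ => simp [fu0]
  | case3 _ c2 rest2 ih =>
    rw [ih]
    rw [show fu0 ('\\' :: c2 :: rest2) c = (fu0 rest2 c).map (· + 2) from rfl]
    simp only [List.map_map]
    apply List.map_congr_left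
    intro a _
    push_cast [Function.comp_apply]
    ring
  | case4 _ ch rest h hc ih =>
    rw [ih]
    rw [fu0_cons ch rest c h, if_pos hc]
    simp only [List.map_cons, List.map_map]
    congr 1
    · simp
    · apply List.map_congr_left
      intro a _
      push_cast [Function.comp_apply]
      ring
  | case5 _ ch rest h hc ih =>
    rw [ih]
    rw [fu0_cons ch rest c h, if_neg hc]
    simp only [List.map_map]
    apply List.map_congr_left
    intro a _
    push_cast [Function.comp_apply]
    ring

-- step function of A's replacement loop, in take/drop form
def spliceStep (d : String) (k : Nat) (cur : List Char) : List Char :=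
  cur.take k ++ ('\\' :: d.toList) ++ cur.drop (k + 1)

lemma foldr_splice_map_succ (d : String) (ks : List Nat) (a : Char) (m : List Char) :
    (ks.map (· + 1)).foldr (spliceStep d) (a :: m)
      = a :: ks.foldr (spliceStep d) m := by
  induction ks with
  | nil => rfl
  | cons k t ih => simp [spliceStep, List.foldr_cons, ih, List.take_succ_cons, List.drop_succ_cons]

lemma map_add_two_eq (ks : List Nat) : ks.map (· + 2) = (ks.map (· + 1)).map (· + 1) := by
  simp only [List.map_map]
  apply List.map_congr_left
  intro a _
  simp

lemma foldr_splice_eq_ebOut (d : String) : ∀ (n : Nat) (l : List Char), l.length ≤ n →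
    (fu0 l d.toList).foldr (spliceStep d) l = ebOut false l d := by
  intro n
  induction n with
  | zero => intro l hl; rw [List.length_eq_zero_iff.mp (Nat.le_zero.mp hl)]; rfl
  | succ n ih =>
    intro l hl
    match l with
    | [] => rfl
    | ch :: t =>
      by_cases h : ch = '\\'
      · subst h
        match t with
        | [] => simp [fu0, ebOut]
        | c2 :: t2 =>
          have ht2 : t2.length ≤ n := by
            have : (('\\' :: c2 :: t2).length ≤ n + 1) := hl
            simp at this; omega
          rw [show fu0 ('\\' :: c2 :: t2) d.toList = (fu0 t2 d.toList).map (· + 2) from rfl]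
          rw [map_add_two_eq, foldr_splice_map_succ, foldr_splice_map_succ, ih t2 ht2]
          simp [ebOut]
      · have ht : t.length ≤ n := by
          have : ((ch :: t).length ≤ n + 1) := hl
          simp at this; omega
        by_cases hc : [ch] = d.toList
        · rw [fu0_cons ch t d.toList h, if_pos hc]
          rw [List.foldr_cons, foldr_splice_map_succ, ih t ht]
          have hd : String.ofList [ch] = d := by
            rw [← String.toList_inj]; simpa using hc
          simp [spliceStep, ebOut, h, hd, ← hc]
        · rw [fu0_cons ch t d.toList h, if_neg hc]
          rw [foldr_splice_map_succ, ih t ht]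
          have hd : ¬ String.ofList [ch] = d := by
            intro hh; exact hc (by simpa using congrArg String.toList hh)
          simp [ebOut, h, hd]

lemma escapeA_eq (l : List Char) (d : String) : escapeA l d = ebOut false l d := by
  unfold escapeA
  rw [fuAux_eq_fu0, List.foldl_reverse]
  simp only [zero_add, List.foldr_map]
  have hstep : (fun (k : Nat) (cur : List Char) =>
      PySem.List.slice cur none (some ((k : Int))) ++ ('\\' :: d.toList) ++
        PySem.List.slice cur (some ((k : Int) + 1)) none) = spliceStep d := by
    funext k cur
    rw [spliceStep, PySem.List.slice_to_natCast]
    have hk : ((k : Int) + 1) = ((k + 1 : Nat) : Int) := by push_cast; ring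
    rw [hk, PySem.List.slice_from_natCast]
  rw [hstep]
  exact foldr_splice_eq_ebOut d l.length l (le_refl _)

-- ===== VERDICT (by name: the statement is the Claim_ definition above) =====
theorem with_delimiter_spec : Claim_equal_with_delimiter := by
  intro s chars _ hpre
  unfold Spec_with_delimiter with_delimiter with_delimiter_alt
  rw [find_eq]
  cases hf : chars.find? (fun c => !(PySem.Set.contains (scanUnescaped s.toList).2 c)) with
  | none =>
    match chars with
    | [] => exact absurd rfl hpre
    | d0 :: t => simp [escapeA_eq, escapeB_eq]
  | some d =>
    by_cases hd : d = ""
    · match chars with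
      | [] => exact absurd rfl hpre
      | d0 :: t => simp [hd, escapeA_eq, escapeB_eq]
    · simp [hd]
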